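-- pv_equiv track=rewrite | github.com/ClyptAI/Clypt-Backend | backend/pipeline/audience/crowd_3_score_windows.py | _snap_window_to_boundaries
-- ===== SOURCE A (Python) =====
-- MIN_CLIP_MS = 12_000
--
-- MAX_CLIP_MS = 45_000
--
-- BOUNDARY_SNAP_BACK_MS = 2_800
--
-- BOUNDARY_SNAP_FORWARD_MS = 3_600
--
-- def _snap_window_to_boundaries(
--     start_ms: int,
--     end_ms: int,
--     boundaries: list[int],
--     duration_ms: int,
-- ) -> tuple[int, int, bool]:
--     snapped = False
--     candidate_starts = [value for value in boundaries if value <= start_ms and start_ms - value <= BOUNDARY_SNAP_BACK_MS]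
--     candidate_ends = [value for value in boundaries if value >= end_ms and value - end_ms <= BOUNDARY_SNAP_FORWARD_MS]
--
--     if candidate_starts:
--         start_ms = max(candidate_starts)
--         snapped = True
--     if candidate_ends:
--         end_ms = min(candidate_ends)
--         snapped = True
--
--     start_ms = max(0, start_ms)
--     end_ms = min(duration_ms or end_ms, end_ms)
--     if end_ms - start_ms < MIN_CLIP_MS:
--         target_end = min(duration_ms or (start_ms + MIN_CLIP_MS), start_ms + MIN_CLIP_MS)
--         extension_candidates = [value for value in boundaries if value >= target_end]
--         end_ms = extension_candidates[0] if extension_candidates else target_end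
--     if end_ms - start_ms > MAX_CLIP_MS:
--         target_end = start_ms + MAX_CLIP_MS
--         trim_candidates = [value for value in boundaries if start_ms < value <= target_end]
--         end_ms = trim_candidates[-1] if trim_candidates else target_end
--     return start_ms, end_ms, snapped
-- ===== SOURCE B (Python) =====
-- MIN_CLIP_MS = 12_000
-- MAX_CLIP_MS = 45_000
-- BOUNDARY_SNAP_BACK_MS = 2_800
-- BOUNDARY_SNAP_FORWARD_MS = 3_600
--
-- def _bisect_right(a, x):
--     # textbook bisect_right (stdlib bisect not importable here: A imports nothing)
--     lo, hi = 0, len(a)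
--     while lo < hi:
--         mid = (lo + hi) // 2
--         if a[mid] <= x:
--             lo = mid + 1
--         else:
--             hi = mid
--     return lo
--
-- def _snap_window_to_boundaries(
--     start_ms: int,
--     end_ms: int,
--     boundaries: list[int],
--     duration_ms: int,
-- ) -> tuple[int, int, bool]:
--     # Sort a copy once and binary-search it for the snap neighbours (max boundary
--     # <= start, min boundary >= end are order-independent, so sorting is exact).
--     # The extension/trim lookups depend on the original list order, so they stay
--     # order-respecting single scans (first match with break / last match kept).
--     srt = sorted(boundaries)
--     n = len(srt)
--     i = _bisect_right(srt, start_ms)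
--     snap_start = i > 0 and start_ms - srt[i - 1] <= BOUNDARY_SNAP_BACK_MS
--     j = _bisect_right(srt, end_ms - 1)
--     snap_end = j < n and srt[j] - end_ms <= BOUNDARY_SNAP_FORWARD_MS
--     snapped = snap_start or snap_end
--     if snap_start:
--         start_ms = srt[i - 1]
--     if snap_end:
--         end_ms = srt[j]
--
--     start_ms = max(0, start_ms)
--     end_ms = min(duration_ms or end_ms, end_ms)
--     if end_ms - start_ms < MIN_CLIP_MS:
--         target_end = min(duration_ms or (start_ms + MIN_CLIP_MS), start_ms + MIN_CLIP_MS)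
--         end_ms = target_end
--         for v in boundaries:
--             if v >= target_end:
--                 end_ms = v
--                 break
--     if end_ms - start_ms > MAX_CLIP_MS:
--         target_end = start_ms + MAX_CLIP_MS
--         end_ms = target_end
--         for v in boundaries:
--             if start_ms < v <= target_end:
--                 end_ms = v
--     return start_ms, end_ms, snapped
-- ===== Notes on version B (the rewrite author's own statement) =====
-- stated objective: alternative
-- what changed: A makes four full-list filter passes and takes max/min/first/last of the materialised candidate lists; B sorts a copy once and locates both snap neighbours (greatest boundary <= start, least boundary >= end) by hand-written binary search, keeping single order-respecting scans only for the order-dependent extension/trim lookups.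
import Mathlib
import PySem

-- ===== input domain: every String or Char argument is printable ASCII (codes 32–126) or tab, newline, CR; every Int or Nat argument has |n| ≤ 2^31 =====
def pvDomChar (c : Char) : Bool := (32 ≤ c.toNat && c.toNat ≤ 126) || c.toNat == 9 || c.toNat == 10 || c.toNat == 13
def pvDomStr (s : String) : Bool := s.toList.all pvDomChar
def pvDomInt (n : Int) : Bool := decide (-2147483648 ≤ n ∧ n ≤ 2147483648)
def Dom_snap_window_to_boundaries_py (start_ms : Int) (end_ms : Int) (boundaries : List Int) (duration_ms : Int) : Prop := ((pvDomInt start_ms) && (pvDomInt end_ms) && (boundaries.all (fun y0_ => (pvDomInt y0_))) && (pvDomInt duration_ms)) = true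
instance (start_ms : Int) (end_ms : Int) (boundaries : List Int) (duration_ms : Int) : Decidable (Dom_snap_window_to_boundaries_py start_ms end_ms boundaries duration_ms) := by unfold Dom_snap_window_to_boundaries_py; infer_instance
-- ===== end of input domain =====

-- B finds the two snap neighbours by binary search on a sorted copy instead of A's
-- filter+max/min passes; the order-dependent extension/trim lookups stay single scans
-- (objective: alternative; return value only, neither program mutates its arguments).

-- ===== PORT A =====
def snap_window_to_boundaries_py (start_ms : Int) (end_ms : Int) (boundaries : List Int) (duration_ms : Int) : Int × Int × Bool :=
  let snapped := false
  let candidate_starts := boundaries.filter (fun v => decide (v ≤ start_ms) && decide (start_ms - v ≤ 2800))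
  let candidate_ends := boundaries.filter (fun v => decide (end_ms ≤ v) && decide (v - end_ms ≤ 3600))
  let sp1 :=
    match PySem.List.max? candidate_starts (fun x => x) with
    | some m => (m, true)
    | none => (start_ms, snapped)
  let ep1 :=
    match PySem.List.min? candidate_ends (fun x => x) with
    | some m => (m, true)
    | none => (end_ms, sp1.2)
  let start_ms := max 0 sp1.1
  let end_ms := min (if duration_ms ≠ 0 then duration_ms else ep1.1) ep1.1
  let end_ms :=
    if end_ms - start_ms < 12000 then
      let target_end := min (if duration_ms ≠ 0 then duration_ms else start_ms + 12000) (start_ms + 12000)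
      let extension_candidates := boundaries.filter (fun v => decide (target_end ≤ v))
      match extension_candidates with
      | x :: _ => x
      | [] => target_end
    else end_ms
  let end_ms :=
    if end_ms - start_ms > 45000 then
      let target_end := start_ms + 45000
      let trim_candidates := boundaries.filter (fun v => decide (start_ms < v) && decide (v ≤ target_end))
      match trim_candidates.getLast? with
      | some x => x
      | none => target_end
    else end_ms
  (start_ms, end_ms, ep1.2)

-- ===== PORT B =====
-- Source B's hand-written `_bisect_right` is the textbook bisect_right loop, ported as the
-- prelude's exact primitive PySem.List.bisectRight (same algorithm, same values).
-- `srt[i-1]` / `srt[j]` are positive in-range indexings, ported as List.getD (exact there).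
def snap_window_to_boundaries_py_alt (start_ms : Int) (end_ms : Int) (boundaries : List Int) (duration_ms : Int) : Int × Int × Bool :=
  let srt := PySem.List.sorted boundaries (fun x => x) false
  let n := srt.length
  let i := PySem.List.bisectRight srt start_ms
  let snap_start := decide (0 < i ∧ start_ms - srt.getD (i - 1) 0 ≤ 2800)
  let j := PySem.List.bisectRight srt (end_ms - 1)
  let snap_end := decide (j < n ∧ srt.getD j 0 - end_ms ≤ 3600)
  let snapped := snap_start || snap_end
  let start1 := if snap_start then srt.getD (i - 1) 0 else start_ms
  let end1 := if snap_end then srt.getD j 0 else end_ms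
  let start2 := max 0 start1
  let end2 := min (if duration_ms ≠ 0 then duration_ms else end1) end1
  let end3 :=
    if end2 - start2 < 12000 then
      let target_end := min (if duration_ms ≠ 0 then duration_ms else start2 + 12000) (start2 + 12000)
      -- 'for v in boundaries: if v >= target_end: end_ms = v; break' (first match wins)
      match boundaries.find? (fun v => decide (target_end ≤ v)) with
      | some v => v
      | none => target_end
    else end2
  let end4 :=
    if end3 - start2 > 45000 then
      let target_end := start2 + 45000
      -- forward scan keeping the last match
      match boundaries.foldl (fun acc v => if start2 < v ∧ v ≤ target_end then some v else acc) none with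
      | some v => v
      | none => target_end
    else end3
  (start2, end4, snapped)

-- ===== PRECONDITION & SPEC =====
def Spec_snap_window_to_boundaries_py (start_ms : Int) (end_ms : Int) (boundaries : List Int) (duration_ms : Int) (out : Int × Int × Bool) : Prop := out = snap_window_to_boundaries_py_alt start_ms end_ms boundaries duration_ms
instance (start_ms : Int) (end_ms : Int) (boundaries : List Int) (duration_ms : Int) (out : Int × Int × Bool) : Decidable (Spec_snap_window_to_boundaries_py start_ms end_ms boundaries duration_ms out) := by unfold Spec_snap_window_to_boundaries_py; infer_instance

-- ===== CLAIM =====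
def Claim_equal_snap_window_to_boundaries_py : Prop := ∀ (start_ms : Int) (end_ms : Int) (boundaries : List Int) (duration_ms : Int), Dom_snap_window_to_boundaries_py start_ms end_ms boundaries duration_ms → Spec_snap_window_to_boundaries_py start_ms end_ms boundaries duration_ms (snap_window_to_boundaries_py start_ms end_ms boundaries duration_ms)

-- ===== LEMMAS AND PROOFS =====


theorem pvMaxEq (xs : List Int) (m : Int) (hm : m ∈ xs) (hall : ∀ x ∈ xs, x ≤ m) :
    PySem.List.max? xs (fun y => y) = some m := by
  cases xs with
  | nil => simp at hm
  | cons x t =>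
    rw [PySem.List.max?_id_cons]
    congr 1
    have h1 := PySem.List.le_foldl_max t x
    have h2 := PySem.List.foldl_max_mem t x
    have hle : List.foldl max x t ≤ m := by
      rcases h2 with h | h
      · rw [h]; exact hall x (by simp)
      · exact hall _ (by simp [h])
    have hge : m ≤ List.foldl max x t := by
      rcases List.mem_cons.mp hm with rfl | h
      · exact h1.1
      · exact h1.2 m h
    omega

theorem pvMinEq (xs : List Int) (m : Int) (hm : m ∈ xs) (hall : ∀ x ∈ xs, m ≤ x) :
    PySem.List.min? xs (fun y => y) = some m := by
  cases xs with
  | nil => simp at hm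
  | cons x t =>
    rw [PySem.List.min?_id_cons]
    congr 1
    have h1 := PySem.List.foldl_min_le t x
    have h2 := PySem.List.foldl_min_mem t x
    have hge : m ≤ List.foldl min x t := by
      rcases h2 with h | h
      · rw [h]; exact hall x (by simp)
      · exact hall _ (by simp [h])
    have hle : List.foldl min x t ≤ m := by
      rcases List.mem_cons.mp hm with rfl | h
      · exact h1.1
      · exact h1.2 m h
    omega

theorem pvHeadMatch (l : List Int) (q : Int → Bool) (d : Int) :
    (match l.filter q with | x :: _ => x | [] => d) = (match l.find? q with | some v => v | none => d) := by
  rw [← List.head?_filter]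
  cases l.filter q <;> rfl

theorem pvFoldLast (P : Int → Prop) [DecidablePred P] (l : List Int) (a : Option Int) :
    l.foldl (fun acc v => if P v then some v else acc) a
      = ((l.filter (fun v => decide (P v))).getLast?).elim a some := by
  induction l generalizing a with
  | nil => rfl
  | cons x t ih =>
    by_cases h : P x
    · simp only [List.foldl_cons, if_pos h, ih, List.filter_cons, decide_eq_true h,
        if_pos, List.getLast?_cons]
      cases (t.filter (fun v => decide (P v))).getLast? <;> simp
    · simp only [List.foldl_cons, if_neg h, ih, List.filter_cons]
      simp [h]

theorem pvFoldLastNone (P : Int → Prop) [DecidablePred P] (l : List Int) :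
    l.foldl (fun acc v => if P v then some v else acc) none
      = (l.filter (fun v => decide (P v))).getLast? := by
  rw [pvFoldLast]
  cases (l.filter (fun v => decide (P v))).getLast? <;> rfl


theorem pvLeBisect (srt : List Int) (x v : Int) (hpair : srt.Pairwise (fun a b => a ≤ b))
    (hv : v ∈ srt) (hvx : v ≤ x) :
    0 < PySem.List.bisectRight srt x ∧ v ≤ srt.getD (PySem.List.bisectRight srt x - 1) 0 := by
  obtain ⟨hlen, hlt, hgt⟩ := PySem.List.bisectRight_spec srt x hpair
  obtain ⟨k, hk, rfl⟩ := List.mem_iff_getElem.mp hv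
  set i := PySem.List.bisectRight srt x with hi
  have hki : k < i := by
    by_contra h
    exact absurd (hgt k hk (by omega)) (by omega)
  have hipos : 0 < i := by omega
  refine ⟨hipos, ?_⟩
  rw [List.getD_eq_getElem _ _ (by omega : i - 1 < srt.length)]
  rcases Nat.lt_or_ge k (i-1) with h | h
  · exact List.pairwise_iff_getElem.mp hpair k (i-1) hk (by omega) h
  · have : k = i - 1 := by omega
    subst this; exact le_refl _

theorem pvGeBisect (srt : List Int) (e v : Int) (hpair : srt.Pairwise (fun a b => a ≤ b))
    (hv : v ∈ srt) (hev : e ≤ v) :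
    PySem.List.bisectRight srt (e - 1) < srt.length ∧ srt.getD (PySem.List.bisectRight srt (e - 1)) 0 ≤ v := by
  obtain ⟨hlen, hlt, hgt⟩ := PySem.List.bisectRight_spec srt (e-1) hpair
  obtain ⟨k, hk, rfl⟩ := List.mem_iff_getElem.mp hv
  set j := PySem.List.bisectRight srt (e-1) with hj
  have hkj : j ≤ k := by
    by_contra h
    exact absurd (hlt k hk (by omega)) (by omega)
  have hjlt : j < srt.length := by omega
  refine ⟨hjlt, ?_⟩
  rw [List.getD_eq_getElem _ _ hjlt]
  rcases Nat.lt_or_ge j k with h | h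
  · exact List.pairwise_iff_getElem.mp hpair j k hjlt hk h
  · have : j = k := by omega
    subst this; exact le_refl _

theorem pvStartPos (l srt : List Int) (s : Int) (hperm : srt.Perm l)
    (hpair : srt.Pairwise (fun a b => a ≤ b))
    (h1 : 0 < PySem.List.bisectRight srt s)
    (h2 : s - srt.getD (PySem.List.bisectRight srt s - 1) 0 ≤ 2800) :
    PySem.List.max? (l.filter (fun v => decide (v ≤ s) && decide (s - v ≤ 2800))) (fun y => y)
      = some (srt.getD (PySem.List.bisectRight srt s - 1) 0) := by
  obtain ⟨hlen, hlt, hgt⟩ := PySem.List.bisectRight_spec srt s hpair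
  set i := PySem.List.bisectRight srt s with hi
  have him : i - 1 < srt.length := by omega
  set m := srt.getD (i - 1) 0 with hm
  have hmem_srt : m ∈ srt := by
    rw [hm, List.getD_eq_getElem _ _ him]; exact List.getElem_mem him
  have hms : m ≤ s := by
    have := hlt (i-1) him (by omega)
    rwa [hm, List.getD_eq_getElem _ _ him]
  apply pvMaxEq
  · rw [List.mem_filter]
    exact ⟨hperm.mem_iff.mp hmem_srt, by simp; omega⟩
  · intro x hx
    rw [List.mem_filter] at hx
    obtain ⟨hxl, hxp⟩ := hx
    simp only [Bool.and_eq_true, decide_eq_true_eq] at hxp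
    exact (pvLeBisect srt s x hpair (hperm.mem_iff.mpr hxl) hxp.1).2

theorem pvStartNeg (l srt : List Int) (s : Int) (hperm : srt.Perm l)
    (hpair : srt.Pairwise (fun a b => a ≤ b))
    (hn : ¬ (0 < PySem.List.bisectRight srt s ∧ s - srt.getD (PySem.List.bisectRight srt s - 1) 0 ≤ 2800)) :
    l.filter (fun v => decide (v ≤ s) && decide (s - v ≤ 2800)) = [] := by
  rw [List.filter_eq_nil_iff]
  intro v hv hb
  simp only [Bool.and_eq_true, decide_eq_true_eq] at hb
  obtain ⟨hpos, hle⟩ := pvLeBisect srt s v hpair (hperm.mem_iff.mpr hv) hb.1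
  exact hn ⟨hpos, by omega⟩

theorem pvEndPos (l srt : List Int) (e : Int) (hperm : srt.Perm l)
    (hpair : srt.Pairwise (fun a b => a ≤ b))
    (h1 : PySem.List.bisectRight srt (e - 1) < srt.length)
    (h2 : srt.getD (PySem.List.bisectRight srt (e - 1)) 0 - e ≤ 3600) :
    PySem.List.min? (l.filter (fun v => decide (e ≤ v) && decide (v - e ≤ 3600))) (fun y => y)
      = some (srt.getD (PySem.List.bisectRight srt (e - 1)) 0) := by
  obtain ⟨hlen, hlt, hgt⟩ := PySem.List.bisectRight_spec srt (e-1) hpair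
  set j := PySem.List.bisectRight srt (e-1) with hj
  set m := srt.getD j 0 with hm
  have hmem_srt : m ∈ srt := by
    rw [hm, List.getD_eq_getElem _ _ h1]; exact List.getElem_mem h1
  have hem : e ≤ m := by
    have := hgt j h1 (by omega)
    rw [hm, List.getD_eq_getElem _ _ h1]; omega
  apply pvMinEq
  · rw [List.mem_filter]
    exact ⟨hperm.mem_iff.mp hmem_srt, by simp; omega⟩
  · intro x hx
    rw [List.mem_filter] at hx
    obtain ⟨hxl, hxp⟩ := hx
    simp only [Bool.and_eq_true, decide_eq_true_eq] at hxp
    exact (pvGeBisect srt e x hpair (hperm.mem_iff.mpr hxl) hxp.1).2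

theorem pvEndNeg (l srt : List Int) (e : Int) (hperm : srt.Perm l)
    (hpair : srt.Pairwise (fun a b => a ≤ b))
    (hn : ¬ (PySem.List.bisectRight srt (e - 1) < srt.length ∧ srt.getD (PySem.List.bisectRight srt (e - 1)) 0 - e ≤ 3600)) :
    l.filter (fun v => decide (e ≤ v) && decide (v - e ≤ 3600)) = [] := by
  rw [List.filter_eq_nil_iff]
  intro v hv hb
  simp only [Bool.and_eq_true, decide_eq_true_eq] at hb
  obtain ⟨hlt, hle⟩ := pvGeBisect srt e v hpair (hperm.mem_iff.mpr hv) hb.1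
  exact hn ⟨hlt, by omega⟩

-- ===== VERDICT =====
theorem snap_window_to_boundaries_py_spec : Claim_equal_snap_window_to_boundaries_py := by
  intro s e l d _
  unfold Spec_snap_window_to_boundaries_py
  have hperm : (PySem.List.sorted l (fun x => x) false).Perm l := PySem.List.sorted_perm l (fun x => x) false
  have hpair : (PySem.List.sorted l (fun x => x) false).Pairwise (fun a b => a ≤ b) :=
    PySem.List.sorted_pairwise l (fun x => x)
  set srt := PySem.List.sorted l (fun x => x) false with hsrt
  by_cases hc1 : 0 < PySem.List.bisectRight srt s ∧ s - srt.getD (PySem.List.bisectRight srt s - 1) 0 ≤ 2800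
  · by_cases hc2 : PySem.List.bisectRight srt (e - 1) < srt.length ∧ srt.getD (PySem.List.bisectRight srt (e - 1)) 0 - e ≤ 3600
    · simp only [snap_window_to_boundaries_py, snap_window_to_boundaries_py_alt, ← hsrt,
        pvStartPos l srt s hperm hpair hc1.1 hc1.2, pvEndPos l srt e hperm hpair hc2.1 hc2.2,
        hc1, hc2, pvHeadMatch, pvFoldLastNone, Bool.decide_and]
      simp
      try rfl
    · simp only [snap_window_to_boundaries_py, snap_window_to_boundaries_py_alt, ← hsrt,
        pvStartPos l srt s hperm hpair hc1.1 hc1.2, pvEndNeg l srt e hperm hpair hc2,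
        hc1, hc2, decide_true,
        pvHeadMatch, pvFoldLastNone, Bool.decide_and, PySem.List.min?]
      simp
      try rfl
  · by_cases hc2 : PySem.List.bisectRight srt (e - 1) < srt.length ∧ srt.getD (PySem.List.bisectRight srt (e - 1)) 0 - e ≤ 3600
    · simp only [snap_window_to_boundaries_py, snap_window_to_boundaries_py_alt, ← hsrt,
        pvStartNeg l srt s hperm hpair hc1, pvEndPos l srt e hperm hpair hc2.1 hc2.2,
        hc1, hc2, decide_true,
        pvHeadMatch, pvFoldLastNone, Bool.decide_and, PySem.List.max?]
      simp
      try rfl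
    · simp only [snap_window_to_boundaries_py, snap_window_to_boundaries_py_alt, ← hsrt,
        pvStartNeg l srt s hperm hpair hc1, pvEndNeg l srt e hperm hpair hc2,
        hc1, hc2, decide_false, Bool.or_false,
        pvHeadMatch, pvFoldLastNone, Bool.decide_and, PySem.List.max?, PySem.List.min?]
      simp
      try rfl
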